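-- pv_equiv track=rewrite | github.com/redmoogle/Rednako | modules/helpers.py | dividelist
-- ===== SOURCE A (Python) =====
-- def TypedError(expected, got):
--     """
--     Creates a helpful TypeError
--     Args:
--         expected: What should got should have been
--         got: What the type was instead
--
--     Returns:
--         TypeError specifying what it got and what it wanted
--     """
--     raise TypeError(f"Expected {type(expected)} got {type(got)} instead")
--
-- def dividelist(lst: list, divisor, offset=0) -> list:
--     """
--     Slices a list while keeping the index stable
--
--         Parameters:
--             lst (list): list to slice
--             divisor (int): What to divide(modulo) by
--             offset (int): Offset of the index
--
--         Returns:
--             Sliced List (list): the list but sliced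
--     """
--
--     if not isinstance(lst, list):
--         TypedError(list, lst)
--     indexoffset = 1
--     for index in range(1, len(lst) + 1):
--         if (index + offset) % divisor == 0:
--             lst.pop(index - indexoffset)
--             indexoffset += 1
--     return lst
-- ===== SOURCE B (Python) =====
-- def TypedError(expected, got):
--     raise TypeError(f"Expected {type(expected)} got {type(got)} instead")
--
-- def dividelist(lst: list, divisor, offset=0) -> list:
--     """One-pass filter: keep the elements whose stable 1-based index (+offset)
--     is not divisible by divisor; written back into lst in place."""
--     if not isinstance(lst, list):
--         TypedError(list, lst)
--     lst[:] = [x for i, x in enumerate(lst, 1) if (i + offset) % divisor != 0]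
--     return lst
-- ===== Notes on version B (the rewrite author's own statement) =====
-- stated objective: simpler
-- what changed: Replaces A's mutate-while-iterating loop (popping elements by a shifting index while scanning range(1, len+1)) with a single-pass enumerate+filter comprehension that keeps elements whose stable 1-based index (+offset) is not divisible by divisor, written back into lst in place.
import Mathlib
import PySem

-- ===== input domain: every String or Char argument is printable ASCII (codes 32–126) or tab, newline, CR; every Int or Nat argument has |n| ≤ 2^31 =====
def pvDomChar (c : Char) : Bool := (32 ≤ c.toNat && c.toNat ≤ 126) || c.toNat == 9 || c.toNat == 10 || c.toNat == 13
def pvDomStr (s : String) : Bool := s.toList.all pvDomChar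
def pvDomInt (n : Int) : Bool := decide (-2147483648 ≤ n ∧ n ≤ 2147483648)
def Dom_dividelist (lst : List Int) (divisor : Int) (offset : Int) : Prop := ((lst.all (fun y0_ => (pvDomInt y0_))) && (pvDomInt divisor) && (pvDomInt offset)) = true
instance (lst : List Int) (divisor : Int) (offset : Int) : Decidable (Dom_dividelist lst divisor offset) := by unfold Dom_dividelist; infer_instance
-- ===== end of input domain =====

-- B replaces A's mutate-while-iterating pop loop by a single-pass enumerate+filter
-- (objective: simpler).  Both A and B mutate lst in place in Python; the equivalence
-- proved here is about the return value.

-- ===== PORT A =====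
-- one iteration of A's 'for index in range(1, len(lst)+1)' loop; state = (lst, indexoffset)
def dividelistStep (divisor : Int) (offset : Int) (st : List Int × Int) (index : Int) : List Int × Int :=
  if PySem.Int.mod (index + offset) divisor = 0 then
    match PySem.List.pop? st.1 (index - st.2) with
    | some (_, rest) => (rest, st.2 + 1)
    | none => st                 -- unreachable: pop's index is always in range (proved below)
  else st

def dividelist (lst : List Int) (divisor : Int) (offset : Int) : List Int :=
  ((PySem.List.pyRange 1 ((lst.length : Int) + 1) 1).foldl (dividelistStep divisor offset) (lst, 1)).1

-- ===== PORT B =====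
def dividelist_alt (lst : List Int) (divisor : Int) (offset : Int) : List Int :=
  ((PySem.List.enumerate lst 1).filter
      (fun p => PySem.Int.mod (p.1 + offset) divisor != 0)).map (·.2)

-- ===== PRECONDITION & SPEC =====
-- Pre_ excludes exactly the inputs where Python A raises ZeroDivisionError:
-- divisor == 0 with a non-empty list.
def Pre_dividelist (lst : List Int) (divisor : Int) (offset : Int) : Prop :=
  divisor ≠ 0 ∨ lst = []
instance (lst : List Int) (divisor : Int) (offset : Int) : Decidable (Pre_dividelist lst divisor offset) := by unfold Pre_dividelist; infer_instance

def pvWitness_dividelist : List Int × Int × Int := ([1, 2, 3, 4, 5, 6], 2, 0)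

def Spec_dividelist (lst : List Int) (divisor : Int) (offset : Int) (out : List Int) : Prop := out = dividelist_alt lst divisor offset
instance (lst : List Int) (divisor : Int) (offset : Int) (out : List Int) : Decidable (Spec_dividelist lst divisor offset out) := by unfold Spec_dividelist; infer_instance

-- ===== CLAIM (what is proved, stated in full; the proofs are below) =====
def Claim_equal_dividelist : Prop := ∀ (lst : List Int) (divisor : Int) (offset : Int), Dom_dividelist lst divisor offset → Pre_dividelist lst divisor offset → Spec_dividelist lst divisor offset (dividelist lst divisor offset)

-- ===== LEMMAS AND PROOFS =====

-- popping position F.length out of F ++ x :: rs removes exactly x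
theorem pop_at_filtered_length {F rs : List Int} {x : Int} :
    PySem.List.pop? (F ++ x :: rs) ((F.length : Int)) = some (x, F ++ rs) := by
  have hidx : PySem.List.pyIdx? (F.length + (rs.length + 1)) ((F.length : Int)) = some F.length := by
    simp [PySem.List.pyIdx?]
  simp [PySem.List.pop?, hidx]
  simp [List.eraseIdx_append_of_length_le (le_refl _)]

-- loop invariant: after the kept prefix F (with next 1-based index i0 and
-- indexoffset i0 - F.length), A's loop filters the remaining suffix
theorem dividelist_loop (divisor offset : Int) :
    ∀ (rest F : List Int) (i0 : Int),
      ((PySem.List.pyRange i0 (i0 + (rest.length : Int)) 1).foldl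
          (dividelistStep divisor offset) (F ++ rest, i0 - (F.length : Int))).1
        = F ++ ((PySem.List.enumerate rest i0).filter
            (fun p => PySem.Int.mod (p.1 + offset) divisor != 0)).map (·.2) := by
  intro rest
  induction rest with
  | nil =>
    intro F i0
    rw [show i0 + (([] : List Int).length : Int) = i0 by simp,
        PySem.List.pyRange_one_eq_nil (le_refl i0)]
    simp [PySem.List.enumerate]
  | cons x rs ih =>
    intro F i0
    rw [PySem.List.pyRange_one_cons (by simp)]
    simp only [List.foldl_cons]
    rw [PySem.List.enumerate_cons]
    by_cases h : PySem.Int.mod (i0 + offset) divisor = 0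
    · have hstep : dividelistStep divisor offset (F ++ x :: rs, i0 - (F.length : Int)) i0
          = (F ++ rs, i0 + 1 - (F.length : Int)) := by
        simp only [dividelistStep, h, if_pos]
        rw [show i0 - (i0 - (F.length : Int)) = (F.length : Int) by ring,
            pop_at_filtered_length]
        simp; ring
      rw [hstep]
      have := ih F (i0 + 1)
      rw [show i0 + ((x :: rs).length : Int) = (i0 + 1) + (rs.length : Int) by simp; ring]
      rw [this]
      simp [h]
    · have hstep : dividelistStep divisor offset (F ++ x :: rs, i0 - (F.length : Int)) i0
          = ((F ++ [x]) ++ rs, (i0 + 1) - ((F ++ [x]).length : Int)) := by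
        simp only [dividelistStep, if_neg h]
        apply Prod.ext <;> simp
      rw [hstep]
      have := ih (F ++ [x]) (i0 + 1)
      rw [show i0 + ((x :: rs).length : Int) = (i0 + 1) + (rs.length : Int) by simp; ring]
      rw [this]
      simp [h]

-- ===== VERDICT (by name: the statement is the Claim_ definition above) =====
theorem dividelist_spec : Claim_equal_dividelist := by
  intro lst divisor offset _ _
  unfold Spec_dividelist dividelist dividelist_alt
  rw [show ((lst.length : Int) + 1) = 1 + (lst.length : Int) by ring]
  have := dividelist_loop divisor offset lst [] 1
  simpa using this
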